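-- pv_equiv track=rewrite | github.com/aledlie/ast-grep-mcp | src/ast_grep_mcp/features/deduplication/applicator_executor.py | _find_java_import_location
-- ===== SOURCE A (Python) =====
-- from typing import Any, Dict, List
--
-- def _find_java_import_location(lines: List[str]) -> tuple[int, bool]:
--     """Find where to insert an import in Java code.
--
--     Args:
--         lines: Code lines
--
--     Returns:
--         Tuple of (insert_index, needs_blank_before)
--     """
--     package_idx = -1
--     last_import_idx = -1
--
--     for i, line in enumerate(lines):
--         stripped = line.strip()
--         if stripped.startswith("package "):
--             package_idx = i
--         elif stripped.startswith("import "):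
--             last_import_idx = i
--
--     if last_import_idx >= 0:
--         return (last_import_idx + 1, False)
--     elif package_idx >= 0:
--         return (package_idx + 1, True)
--     else:
--         return (0, False)
-- ===== SOURCE B (Python) =====
-- from typing import List
--
-- def _find_java_import_location(lines: List[str]) -> tuple[int, bool]:
--     """Find where to insert an import in Java code (reverse scan, early exit)."""
--     package_idx = -1
--     for i in range(len(lines) - 1, -1, -1):
--         stripped = lines[i].strip()
--         if stripped.startswith("import "):
--             # first import seen scanning backward = last import overall
--             return (i + 1, False)
--         if package_idx < 0 and stripped.startswith("package "):
--             package_idx = i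
--     if package_idx >= 0:
--         return (package_idx + 1, True)
--     return (0, False)
-- ===== Notes on version B (the rewrite author's own statement) =====
-- stated objective: alternative
-- what changed: B scans the lines in reverse with an early return at the first import seen (the last import overall), recording only the first package seen backward, instead of A's full forward pass that keeps overwriting both indices and decides afterwards.
import Mathlib
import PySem

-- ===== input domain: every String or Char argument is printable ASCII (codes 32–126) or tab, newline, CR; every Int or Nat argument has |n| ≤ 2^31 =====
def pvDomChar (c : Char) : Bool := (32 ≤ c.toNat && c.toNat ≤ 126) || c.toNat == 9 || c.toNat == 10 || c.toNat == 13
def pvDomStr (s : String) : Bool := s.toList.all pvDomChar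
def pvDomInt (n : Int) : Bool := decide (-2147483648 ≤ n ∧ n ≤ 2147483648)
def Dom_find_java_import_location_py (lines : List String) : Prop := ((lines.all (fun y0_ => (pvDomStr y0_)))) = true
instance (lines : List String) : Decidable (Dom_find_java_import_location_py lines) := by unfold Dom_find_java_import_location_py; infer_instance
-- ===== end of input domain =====

-- B re-implements _find_java_import_location by scanning the lines in reverse with an early return at the first import seen (the last overall), instead of A's full forward pass with two overwritten indices; objective: alternative (same O(n) cost).


-- ===== PORT A =====
-- literal port of A: one forward fold over enumerate keeping (package_idx, last_import_idx)
def find_java_import_location_py (lines : List String) : Int × Bool :=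
  let st := (PySem.List.enumerate lines 0).foldl
    (fun (st : Int × Int) (p : Int × String) =>
      let stripped := PySem.Str.strip p.2
      if PySem.Str.startswith stripped "package " then (p.1, st.2)
      else if PySem.Str.startswith stripped "import " then (st.1, p.1)
      else st) (-1, -1)
  if st.2 ≥ 0 then (st.2 + 1, false)
  else if st.1 ≥ 0 then (st.1 + 1, true)
  else (0, false)

-- ===== PORT B =====
-- port of B: reverse scan with early return at the first import seen backward;
-- pkg records the first package index seen backward (B's "if package_idx < 0")
def pvAltGo (ps : List (Int × String)) (pkg : Option Int) : Int × Bool :=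
  match ps with
  | [] =>
    match pkg with
    | some p => (p + 1, true)
    | none => (0, false)
  | (i, l) :: rest =>
    let stripped := PySem.Str.strip l
    if PySem.Str.startswith stripped "import " then (i + 1, false)
    else if pkg.isNone && PySem.Str.startswith stripped "package " then pvAltGo rest (some i)
    else pvAltGo rest pkg

def find_java_import_location_py_alt (lines : List String) : Int × Bool :=
  pvAltGo (PySem.List.enumerate lines 0).reverse none

-- ===== PRECONDITION & SPEC =====
def Spec_find_java_import_location_py (lines : List String) (out : Int × Bool) : Prop := out = find_java_import_location_py_alt lines
instance (lines : List String) (out : Int × Bool) : Decidable (Spec_find_java_import_location_py lines out) := by unfold Spec_find_java_import_location_py; infer_instance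

-- ===== CLAIM (what is proved, stated in full; the proofs are below) =====
def Claim_equal_find_java_import_location_py : Prop := ∀ (lines : List String), Dom_find_java_import_location_py lines → Spec_find_java_import_location_py lines (find_java_import_location_py lines)

-- ===== LEMMAS AND PROOFS =====

-- a line cannot start with both "import " and "package "
theorem pv_not_both (s : String) (h : PySem.Str.startswith s "import " = true) :
    PySem.Str.startswith s "package " = false := by
  by_contra hb
  simp only [Bool.not_eq_false] at hb
  rw [PySem.Str.startswith_eq] at h hb
  rw [PySem.Chars.startswith_iff] at h hb
  rcases h with ⟨t1, h1⟩
  rcases hb with ⟨t2, h2⟩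
  rw [← h1] at h2
  have e1 : "import ".toList = ['i', 'm', 'p', 'o', 'r', 't', ' '] := by decide
  have e2 : "package ".toList = ['p', 'a', 'c', 'k', 'a', 'g', 'e', ' '] := by decide
  rw [e1, e2] at h2
  simp at h2

def pvStep (st : Int × Int) (p : Int × String) : Int × Int :=
  let stripped := PySem.Str.strip p.2
  if PySem.Str.startswith stripped "package " then (p.1, st.2)
  else if PySem.Str.startswith stripped "import " then (st.1, p.1)
  else st

def pvFinish (st : Int × Int) (pkg : Option Int) : Int × Bool :=
  if st.2 ≥ 0 then (st.2 + 1, false)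
  else match pkg with
  | some p => (p + 1, true)
  | none => if st.1 ≥ 0 then (st.1 + 1, true) else (0, false)

theorem pv_key (ps : List (Int × String)) (pkg : Option Int)
    (hps : ∀ q ∈ ps, 0 ≤ q.1) :
    pvAltGo ps pkg = pvFinish (ps.reverse.foldl pvStep (-1, -1)) pkg := by
  induction ps generalizing pkg with
  | nil => cases pkg <;> simp [pvAltGo, pvFinish]
  | cons hd tl ih =>
    have hhd : 0 ≤ hd.1 := hps hd (by simp)
    have htl : ∀ q ∈ tl, 0 ≤ q.1 := fun q hq => hps q (by simp [hq])
    obtain ⟨i, l⟩ := hd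
    simp only at hhd
    rw [pvAltGo, List.reverse_cons, List.foldl_append, List.foldl_cons, List.foldl_nil]
    by_cases himp : PySem.Str.startswith (PySem.Str.strip l) "import " = true
    · have hpkg := pv_not_both _ himp
      simp only [himp, if_true, pvStep, hpkg, Bool.false_eq_true, if_false, pvFinish]
      split_ifs with h
      · rfl
      · exact absurd hhd (by simpa using h)
    · by_cases hpk : PySem.Str.startswith (PySem.Str.strip l) "package " = true
      · cases pkg with
        | none =>
          simp only [himp, Bool.false_eq_true, if_false, Option.isNone_none, Bool.true_and, hpk,
            if_true]
          rw [ih (some i) htl]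
          simp only [pvStep, hpk, if_true, pvFinish]
          split_ifs <;> first | rfl | exact absurd hhd (by simp_all)
        | some p =>
          simp only [himp, Bool.false_eq_true, if_false, Option.isNone_some, Bool.false_and]
          rw [ih (some p) htl]
          simp only [pvStep, hpk, if_true, pvFinish]
      · simp only [himp, Bool.false_eq_true, if_false, hpk, Bool.and_false]
        rw [ih pkg htl]
        simp only [pvStep, hpk, himp, Bool.false_eq_true, if_false]

-- ===== VERDICT (by name: the statement is the Claim_ definition above) =====
theorem find_java_import_location_py_spec : Claim_equal_find_java_import_location_py := by
  intro lines _
  unfold Spec_find_java_import_location_py find_java_import_location_py find_java_import_location_py_alt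
  rw [pv_key _ none (by
    intro q hq
    rw [List.mem_reverse] at hq
    rw [PySem.List.mem_enumerate_iff] at hq
    obtain ⟨k, hk, rfl⟩ := hq
    simp)]
  rw [List.reverse_reverse]
  rfl
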